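-- pv_equiv track=rewrite | github.com/dryabokon/algo | xxx_combination_sum.py | cmb2
-- ===== SOURCE A (Python) =====
-- def cmb2(k,S):
--
--     D = [1, 2, 3, 4, 5, 6, 7, 8, 9]
--     queue = []
--     res = []
--     for d in D:
--         queue.append([d])
--
--     while len(queue)>0:
--         seq_d = queue.pop()
--         if sum(seq_d)==S and len(seq_d)==k:
--             res.append(seq_d)
--         elif sum(seq_d)>S:
--             continue
--         else:
--             for d in range(1+max(seq_d),10):
--                 queue.append(seq_d+[d])
--
--     return res
-- ===== SOURCE B (Python) =====
-- def cmb2(k, S):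
--     # generate all k-element ascending digit combinations (1..9) in lex order,
--     # filter by sum, and reverse to get A's DFS (descending) emission order
--     def combs(lo, r):
--         if r == 0:
--             return [[]]
--         return [[d] + rest for d in range(lo, 10) for rest in combs(d + 1, r - 1)]
--     if k < 1:
--         return []
--     res = [c for c in combs(1, k) if sum(c) == S]
--     return res[::-1]
-- ===== Notes on version B (the rewrite author's own statement) =====
-- stated objective: simpler
-- what changed: Replaces A's explicit-stack DFS with pruning by a direct generate-and-filter: enumerate the ascending k-combinations of digits 1..9 recursively in lex order, keep those summing to S, and reverse to reproduce A's emission order.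
import Mathlib
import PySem

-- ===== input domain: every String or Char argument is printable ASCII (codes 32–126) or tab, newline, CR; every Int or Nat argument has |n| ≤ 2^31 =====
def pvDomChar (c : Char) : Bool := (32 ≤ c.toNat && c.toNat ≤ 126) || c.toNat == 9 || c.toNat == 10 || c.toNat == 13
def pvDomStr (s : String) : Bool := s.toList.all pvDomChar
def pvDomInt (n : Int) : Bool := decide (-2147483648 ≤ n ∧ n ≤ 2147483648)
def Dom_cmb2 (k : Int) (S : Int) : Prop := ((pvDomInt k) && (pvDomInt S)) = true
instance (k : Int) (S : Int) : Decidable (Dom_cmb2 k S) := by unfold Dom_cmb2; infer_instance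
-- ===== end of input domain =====

-- B replaces A's explicit-stack DFS with plain generate-and-filter over ascending
-- k-combinations of 1..9, reversed at the end to match A's emission order (objective: simpler).

-- ===== PORT A =====

-- max(seq_d): Python max of a list; seq_d is always nonempty in A, so the getD default is never used
def pyMax (seq : List Int) : Int := (PySem.List.max? seq (fun y => y)).getD 0

-- the while loop of A; queue is the Python stack with its TOP at the HEAD.
-- The fuel argument only makes the loop total for Lean: cmb2 passes 1024, and
-- loop_eq_flatMap_emit below proves the loop always empties the queue before fuel runs out
-- (the queue's potential starts at 511 and strictly decreases), so the fuel branch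
-- is never taken and the port computes exactly what A's while loop computes.
def cmb2Loop (k : Int) (S : Int) : Nat → List (List Int) → List (List Int) → List (List Int)
  | _, [], res => res
  | 0, _ :: _, res => res
  | fuel + 1, seq :: rest, res =>
    if seq.sum = S ∧ (seq.length : Int) = k then
      cmb2Loop k S fuel rest (res ++ [seq])
    else if seq.sum > S then
      cmb2Loop k S fuel rest res
    else
      cmb2Loop k S fuel
        (((PySem.List.pyRange (1 + pyMax seq) 10 1).map (fun d => seq ++ [d])).reverse ++ rest)
        res

def cmb2 (k : Int) (S : Int) : List (List Int) :=
  let D : List Int := [1, 2, 3, 4, 5, 6, 7, 8, 9]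
  let queue := D.foldl (fun q d => [d] :: q) []   -- for d in D: queue.append([d])
  cmb2Loop k S 1024 queue []

-- ===== PORT B =====

-- combs(lo, r): all ascending r-element digit lists drawn from lo..9, lex order
def combsB (lo : Int) : Nat → List (List Int)
  | 0 => [[]]
  | r + 1 =>
    (PySem.List.pyRange lo 10 1).flatMap
      (fun d => (combsB (d + 1) r).map (fun rest => d :: rest))

def cmb2_alt (k : Int) (S : Int) : List (List Int) :=
  if k < 1 then []
  else ((combsB 1 k.toNat).filter (fun c => c.sum = S)).reverse

-- ===== PRECONDITION & SPEC =====
def Spec_cmb2 (k : Int) (S : Int) (out : List (List Int)) : Prop := out = cmb2_alt k S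
instance (k : Int) (S : Int) (out : List (List Int)) : Decidable (Spec_cmb2 k S out) := by unfold Spec_cmb2; infer_instance

-- ===== CLAIM (what is proved, stated in full; the proofs are below) =====
def Claim_equal_cmb2 : Prop := ∀ (k : Int) (S : Int), Dom_cmb2 k S → Spec_cmb2 k S (cmb2 k S)

-- ===== LEMMAS AND PROOFS =====

-- potential of one stack entry: a strictly decreasing measure of A's queue,
-- showing the fuel passed by cmb2 is never exhausted
def pot (seq : List Int) : Nat := 2 ^ ((9 - pyMax seq).toNat)

lemma pyMax_append_singleton (seq : List Int) (d : Int) (h : pyMax seq < d) :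
    pyMax (seq ++ [d]) = d := by
  cases seq with
  | nil => simp [pyMax, PySem.List.max?_id_cons]
  | cons x t =>
    have hx : pyMax (x :: t) = t.foldl max x := by
      simp [pyMax, PySem.List.max?_id_cons]
    have hxd : pyMax (x :: t ++ [d]) = (t ++ [d]).foldl max x := by
      simp [pyMax, PySem.List.max?_id_cons]
    rw [hxd, List.foldl_append]
    simp only [List.foldl_cons, List.foldl_nil]
    rw [hx] at h
    omega

-- geometric sum: Σ_{d=m+1}^{9} 2^(9-d) = 2^(9-m) - 1, used for termination
lemma geom_sum_pyRange (n : Nat) : ∀ (m : Int), (9 : Int) - m = n →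
    (((PySem.List.pyRange (1 + m) 10 1).map (fun d => 2 ^ ((9 - d).toNat))).sum)
      = 2 ^ n - 1 := by
  induction n with
  | zero =>
    intro m hm
    have h10 : (10 : Int) ≤ 1 + m := by omega
    rw [PySem.List.pyRange_one_eq_nil h10]
    simp
  | succ n ih =>
    intro m hm
    have hlt : (1 + m : Int) < 10 := by omega
    rw [PySem.List.pyRange_one_cons hlt]
    have h2 : (1 : Int) + m + 1 = 1 + (m + 1) := by ring
    have hih := ih (m + 1) (by omega)
    rw [h2]
    simp only [List.map_cons, List.sum_cons, hih]
    have he : ((9 : Int) - (1 + m)).toNat = n := by omega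
    rw [he]
    have h1 : 1 ≤ 2 ^ n := Nat.one_le_two_pow
    omega

lemma children_pot_sum_lt (seq : List Int) :
    ((((PySem.List.pyRange (1 + pyMax seq) 10 1).map (fun d => seq ++ [d])).reverse).map pot).sum
      < pot seq := by
  rw [List.map_reverse, List.sum_reverse, List.map_map]
  have hcong :
      ((PySem.List.pyRange (1 + pyMax seq) 10 1).map (pot ∘ fun d => seq ++ [d])).sum
        = ((PySem.List.pyRange (1 + pyMax seq) 10 1).map (fun d => 2 ^ ((9 - d).toNat))).sum := by
    apply congrArg
    apply List.map_congr_left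
    intro d hd
    have hb := (PySem.List.mem_pyRange_one).mp hd
    have hm : pyMax (seq ++ [d]) = d := pyMax_append_singleton seq d (by omega)
    simp [pot, hm]
  rw [hcong]
  by_cases hm : pyMax seq ≤ 9
  · have hg := geom_sum_pyRange ((9 - pyMax seq).toNat) (pyMax seq) (by omega)
    rw [hg]
    have h1 : 1 ≤ 2 ^ ((9 - pyMax seq).toNat) := Nat.one_le_two_pow
    simp only [pot]
    omega
  · rw [PySem.List.pyRange_one_eq_nil (by omega)]
    simp only [List.map_nil, List.sum_nil, pot]
    exact Nat.one_le_two_pow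


-- the DFS subtree of one stack entry, in A's emission order (fueled; the
-- recursion depth is bounded by emitD, see emitF_congr / emit_unfold)
def emitF (k : Int) (S : Int) : Nat → List Int → List (List Int)
  | 0, _ => []
  | f + 1, seq =>
    if seq.sum = S ∧ (seq.length : Int) = k then [seq]
    else if seq.sum > S then []
    else
      (((PySem.List.pyRange (1 + pyMax seq) 10 1).map (fun d => seq ++ [d])).reverse).flatMap
        (emitF k S f)

def emitD (seq : List Int) : Nat := (9 - pyMax seq).toNat + 1

def emit (k : Int) (S : Int) (seq : List Int) : List (List Int) :=
  emitF k S (emitD seq) seq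

lemma emitF_congr (k S : Int) : ∀ (f : Nat) (seq : List Int) (g : Nat),
    emitD seq ≤ f → emitD seq ≤ g → emitF k S f seq = emitF k S g seq := by
  intro f
  induction f with
  | zero => intro seq g hf _; exact absurd hf (by simp [emitD])
  | succ f ih =>
    intro seq g hf hg
    cases g with
    | zero => exact absurd hg (by simp [emitD])
    | succ g =>
      simp only [emitF]
      split_ifs
      · rfl
      · rfl
      · apply List.flatMap_congr
        intro c hc
        obtain ⟨d, hd, rfl⟩ := List.mem_map.mp (List.mem_reverse.mp hc)
        have hb := (PySem.List.mem_pyRange_one).mp hd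
        have hmax : pyMax (seq ++ [d]) = d := pyMax_append_singleton seq d (by omega)
        have hD : emitD (seq ++ [d]) ≤ (9 - pyMax seq).toNat := by
          simp only [emitD, hmax]; omega
        have hDs : emitD seq = (9 - pyMax seq).toNat + 1 := rfl
        exact ih (seq ++ [d]) g (by omega) (by omega)

-- the clean unfolding equation of emit (the fuel needed for termination removed)
lemma emit_unfold (k S : Int) (seq : List Int) :
    emit k S seq
      = if seq.sum = S ∧ (seq.length : Int) = k then [seq]
        else if seq.sum > S then []
        else
          (((PySem.List.pyRange (1 + pyMax seq) 10 1).map (fun d => seq ++ [d])).reverse).flatMap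
            (emit k S) := by
  have hDs : emitD seq = (9 - pyMax seq).toNat + 1 := rfl
  rw [emit, hDs]
  simp only [emitF]
  split_ifs
  · rfl
  · rfl
  · apply List.flatMap_congr
    intro c hc
    obtain ⟨d, hd, rfl⟩ := List.mem_map.mp (List.mem_reverse.mp hc)
    have hb := (PySem.List.mem_pyRange_one).mp hd
    have hmax : pyMax (seq ++ [d]) = d := pyMax_append_singleton seq d (by omega)
    have hD : emitD (seq ++ [d]) ≤ (9 - pyMax seq).toNat := by
      simp only [emitD, hmax]; omega
    exact emitF_congr k S ((9 - pyMax seq).toNat) (seq ++ [d]) (emitD (seq ++ [d])) hD le_rfl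

lemma flatMap_reverse' {α β : Type} (l : List α) (f : α → List β) :
    l.reverse.flatMap f = (l.flatMap (fun x => (f x).reverse)).reverse := by
  rw [List.reverse_flatMap]
  apply List.flatMap_congr
  intro x _
  simp

lemma loop_eq_flatMap_emit (k S : Int) : ∀ (fuel : Nat) (queue res : List (List Int)),
    (queue.map pot).sum < fuel →
    cmb2Loop k S fuel queue res = res ++ queue.flatMap (emit k S) := by
  intro fuel
  induction fuel with
  | zero => intro queue res h; exact absurd h (Nat.not_lt_zero _)
  | succ fuel ih =>
    intro queue res h
    match queue with
    | [] => simp [cmb2Loop]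
    | seq :: rest =>
      have hpot : 1 ≤ pot seq := Nat.one_le_two_pow
      simp only [List.map_cons, List.sum_cons] at h
      rw [cmb2Loop]
      split_ifs with h1 h2
      · rw [ih rest (res ++ [seq]) (by omega)]
        conv_rhs => rw [List.flatMap_cons, emit_unfold, if_pos h1]
        simp
      · rw [ih rest res (by omega)]
        conv_rhs => rw [List.flatMap_cons, emit_unfold, if_neg h1, if_pos h2]
        simp
      · have hc := children_pot_sum_lt seq
        rw [ih _ res (by
          simp only [List.map_append, List.sum_append]
          omega)]
        conv_rhs => rw [List.flatMap_cons, emit_unfold, if_neg h1, if_neg h2]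
        rw [List.flatMap_append]
lemma combsB_mem_sum_nonneg : ∀ (r : Nat) (lo : Int), 1 ≤ lo →
    ∀ u ∈ combsB lo r, 0 ≤ u.sum := by
  intro r
  induction r with
  | zero => intro lo _ u hu; simp [combsB] at hu; simp [hu]
  | succ r ih =>
    intro lo hlo u hu
    simp only [combsB] at hu
    obtain ⟨d, hd, hu⟩ := List.mem_flatMap.mp hu
    obtain ⟨rest, hrest, rfl⟩ := List.mem_map.mp hu
    have hb := (PySem.List.mem_pyRange_one).mp hd
    have hr := ih (d + 1) (by omega) rest hrest
    simp only [List.sum_cons]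
    omega

lemma emit_nil_aux (k S : Int) : ∀ (n : Nat) (seq : List Int),
    (9 - pyMax seq).toNat = n → (k : Int) < seq.length → emit k S seq = [] := by
  intro n
  induction n using Nat.strong_induction_on with
  | _ n ih =>
    intro seq hn hk
    rw [emit_unfold]
    have h1 : ¬ (seq.sum = S ∧ (seq.length : Int) = k) := fun h => absurd h.2 (by omega)
    rw [if_neg h1]
    split_ifs with h2
    · rfl
    · rw [List.flatMap_eq_nil_iff]
      intro c hc
      obtain ⟨d, hd, rfl⟩ := List.mem_map.mp (List.mem_reverse.mp hc)
      have hb := (PySem.List.mem_pyRange_one).mp hd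
      have hmax : pyMax (seq ++ [d]) = d := pyMax_append_singleton seq d (by omega)
      apply ih ((9 - d).toNat) (by omega) _ (by rw [hmax])
      simp only [List.length_append, List.length_cons, List.length_nil]
      push_cast
      omega

lemma emit_nil (k S : Int) (seq : List Int) (hk : (k : Int) < seq.length) :
    emit k S seq = [] :=
  emit_nil_aux k S ((9 - pyMax seq).toNat) seq rfl hk

-- main characterisation of the DFS subtree against B's combination generator
lemma emit_eq_combs (k S : Int) : ∀ (n : Nat) (seq : List Int),
    (9 - pyMax seq).toNat = n → 0 ≤ pyMax seq →
    ∀ (r : Nat), (k : Int) = seq.length + r →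
    emit k S seq
      = (((combsB (pyMax seq + 1) r).filter (fun u => seq.sum + u.sum = S)).map
          (fun u => seq ++ u)).reverse := by
  intro n
  induction n using Nat.strong_induction_on with
  | _ n ih =>
    intro seq hn hm r hr
    by_cases h1 : seq.sum = S ∧ (seq.length : Int) = k
    · have hr0 : r = 0 := by omega
      subst hr0
      rw [emit_unfold, if_pos h1]
      simp [combsB, h1.1]
    · by_cases h2 : seq.sum > S
      · rw [emit_unfold, if_neg h1, if_pos h2]
        have hfil : (combsB (pyMax seq + 1) r).filter (fun u => decide (seq.sum + u.sum = S)) = [] := by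
          rw [List.filter_eq_nil_iff]
          intro u hu
          have hnn := combsB_mem_sum_nonneg r (pyMax seq + 1) (by omega) u hu
          simp only [decide_eq_true_eq]
          omega
        rw [hfil]
        simp
      · rw [emit_unfold, if_neg h1, if_neg h2]
        cases r with
        | zero =>
          have hsS : seq.sum ≠ S := fun h => h1 ⟨h, by omega⟩
          have hL : ((((PySem.List.pyRange (1 + pyMax seq) 10 1).map
              (fun d => seq ++ [d])).reverse).flatMap (emit k S)) = [] := by
            rw [List.flatMap_eq_nil_iff]
            intro c hc
            obtain ⟨d, hd, rfl⟩ := List.mem_map.mp (List.mem_reverse.mp hc)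
            apply emit_nil
            simp only [List.length_append, List.length_cons, List.length_nil]
            push_cast
            omega
          rw [hL]
          simp [combsB, hsS]
        | succ r' =>
          -- both sides become a flatMap over the digit range m+1 .. 9
          have hshift : (1 : Int) + pyMax seq = pyMax seq + 1 := by ring
          rw [hshift, flatMap_reverse', List.flatMap_map]
          apply congrArg List.reverse
          rw [combsB, List.filter_flatMap, List.map_flatMap]
          apply List.flatMap_congr
          intro d hd
          have hb := (PySem.List.mem_pyRange_one).mp hd
          have hmax : pyMax (seq ++ [d]) = d := pyMax_append_singleton seq d (by omega)
          have hrec := ih ((9 - d).toNat) (by omega) (seq ++ [d]) (by omega)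
            (by omega) r' (by simp only [List.length_append, List.length_cons,
              List.length_nil]; push_cast; omega)
          rw [hrec, hmax, List.reverse_reverse]
          rw [List.filter_map, List.map_map]
          have hfil : (combsB (d + 1) r').filter (fun u => decide ((seq ++ [d]).sum + u.sum = S))
              = (combsB (d + 1) r').filter
                  ((fun c => decide (seq.sum + c.sum = S)) ∘ (fun rest => d :: rest)) := by
            apply List.filter_congr
            intro u _
            simp only [Function.comp_apply, List.sum_append, List.sum_cons, List.sum_nil,
              decide_eq_decide]
            omega
          rw [hfil]
          apply List.map_congr_left
          intro u _
          simp

-- ===== VERDICT (by name: the statement is the Claim_ definition above) =====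
theorem cmb2_spec : Claim_equal_cmb2 := by
  intro k S _
  unfold Spec_cmb2
  have hq : cmb2 k S
      = cmb2Loop k S 1024 (((PySem.List.pyRange 1 10 1).map (fun d => [d])).reverse) [] := by
    have h1 : ((PySem.List.pyRange 1 10 1).map (fun d : Int => [d])).reverse
        = [[9],[8],[7],[6],[5],[4],[3],[2],[1]] := by decide
    rw [h1]
    rfl
  have hfuel : (((((PySem.List.pyRange 1 10 1).map (fun d : Int => [d])).reverse)).map pot).sum
      < 1024 := by decide
  rw [hq, loop_eq_flatMap_emit k S 1024 _ [] hfuel, List.nil_append]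
  by_cases hk : k < 1
  · rw [cmb2_alt, if_pos hk]
    rw [List.flatMap_eq_nil_iff]
    intro c hc
    obtain ⟨d, hd, rfl⟩ := List.mem_map.mp (List.mem_reverse.mp hc)
    apply emit_nil
    simp only [List.length_cons, List.length_nil]
    omega
  · rw [cmb2_alt, if_neg hk]
    have hkr : k.toNat = (k - 1).toNat + 1 := by omega
    rw [hkr, flatMap_reverse', List.flatMap_map]
    apply congrArg List.reverse
    rw [combsB, List.filter_flatMap]
    apply List.flatMap_congr
    intro d hd
    have hb := (PySem.List.mem_pyRange_one).mp hd
    have hsingle : pyMax [d] = d := by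
      simp [pyMax, PySem.List.max?_id_cons]
    have hrec := emit_eq_combs k S ((9 - d).toNat) [d] (by rw [hsingle])
      (by rw [hsingle]; omega) ((k - 1).toNat)
      (by simp only [List.length_cons, List.length_nil]; omega)
    rw [hrec, hsingle, List.reverse_reverse, List.filter_map]
    have hfil : (combsB (d + 1) (k - 1).toNat).filter (fun u => decide ([d].sum + u.sum = S))
        = (combsB (d + 1) (k - 1).toNat).filter
            ((fun c => decide (c.sum = S)) ∘ (fun rest => d :: rest)) := by
      apply List.filter_congr
      intro u _
      simp only [Function.comp_apply, List.sum_cons, List.sum_nil, decide_eq_decide]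
      omega
    rw [hfil]
    apply List.map_congr_left
    intro u _
    simp
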